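-- pv_equiv track=rewrite | github.com/tunlaton11/Com_pro | function/[Week 11] Casino.py | check_pos
-- ===== SOURCE A (Python) =====
-- def check_pos(pos, move):
--     """[Week 11] Casino"""
--     if pos == "L":
--         pos_list = ["O", "X", "X"]
--     elif pos == "C":
--         pos_list = ["X", "O", "X"]
--     elif pos == "R":
--         pos_list = ["X", "X", "O"]
--
--     for i in move:
--         if i == "A":
--             pos_list[0], pos_list[1] = pos_list[1], pos_list[0]
--         elif i == "B":
--             pos_list[1], pos_list[2] = pos_list[2], pos_list[1]
--         elif i == "C":
--             pos_list[0], pos_list[2] = pos_list[2], pos_list[0]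
--
--     if pos_list.index("O") == 0:
--         return "L"
--     if pos_list.index("O") == 1:
--         return "C"
--     if pos_list.index("O") == 2:
--         return "R"
-- ===== SOURCE B (Python) =====
-- def check_pos(pos, move):
--     """[Week 11] Casino"""
--     perm = {"A": [1, 0, 2], "B": [0, 2, 1], "C": [2, 1, 0]}
--     idx = "LCR".index(pos)
--     for ch in move:
--         if ch in perm:
--             idx = perm[ch][idx]
--     return "LCR"[idx]
-- ===== Notes on version B (the rewrite author's own statement) =====
-- stated objective: simpler
-- what changed: B tracks only the integer index of the 'O' token and applies each move letter as a lookup in a permutation table, instead of maintaining and swapping a 3-element list and scanning it with .index at the end.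
import Mathlib
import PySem

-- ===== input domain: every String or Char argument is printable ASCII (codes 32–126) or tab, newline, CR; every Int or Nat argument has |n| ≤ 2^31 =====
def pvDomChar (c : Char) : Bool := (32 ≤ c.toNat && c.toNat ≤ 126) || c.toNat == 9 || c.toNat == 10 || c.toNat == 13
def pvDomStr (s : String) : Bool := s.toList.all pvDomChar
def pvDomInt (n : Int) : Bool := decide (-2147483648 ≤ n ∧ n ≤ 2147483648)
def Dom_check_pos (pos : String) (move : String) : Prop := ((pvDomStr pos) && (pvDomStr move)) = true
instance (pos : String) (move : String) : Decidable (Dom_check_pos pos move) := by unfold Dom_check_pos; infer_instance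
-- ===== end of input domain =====

-- B tracks only the index of "O" via a table of permutations instead of swapping a 3-element list;
-- objective: simpler (a permutation table replaces the if/elif swap chain and the final .index scan).
-- Pre_ excludes pos ∉ {"L","C","R"}, where the Python A raises UnboundLocalError.

-- ===== PORT A =====
-- one step of A's for-loop: the if/elif chain of simultaneous index swaps on the 3-element list
def pvStepA (l : List String) (c : Char) : List String :=
  if c = 'A' then match l with | [a, b, x] => [b, a, x] | _ => l
  else if c = 'B' then match l with | [a, b, x] => [a, x, b] | _ => l
  else if c = 'C' then match l with | [a, b, x] => [x, b, a] | _ => l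
  else l

def check_pos (pos : String) (move : String) : String :=
  let pos_list : List String :=
    if pos = "L" then ["O", "X", "X"]
    else if pos = "C" then ["X", "O", "X"]
    else if pos = "R" then ["X", "X", "O"]
    else []  -- Python: pos_list stays unbound and the loop raises UnboundLocalError; excluded by Pre_
  let pos_list := move.toList.foldl pvStepA pos_list
  if PySem.List.index? pos_list "O" = some 0 then "L"
  else if PySem.List.index? pos_list "O" = some 1 then "C"
  else if PySem.List.index? pos_list "O" = some 2 then "R"
  else ""  -- Python falls off the end (None); unreachable inside Pre_

-- ===== PORT B =====
-- the dict literal perm = {"A": [1,0,2], "B": [0,2,1], "C": [2,1,0]}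
def pvPerm : PySem.Dict Char (List Int) :=
  PySem.Dict.ofList [('A', [1, 0, 2]), ('B', [0, 2, 1]), ('C', [2, 1, 0])]

-- one step of B's loop: 'if ch in perm: idx = perm[ch][idx]'
def pvStepB (i : Int) (c : Char) : Int :=
  match pvPerm.get? c with
  | some p => (PySem.List.pyGet? p i).getD i  -- getD unreachable inside Pre_ (idx ∈ {0,1,2})
  | none => i

def check_pos_alt (pos : String) (move : String) : String :=
  let idx : Int := PySem.Str.find "LCR" pos  -- "LCR".index(pos); found (≥ 0) inside Pre_
  let idx := move.toList.foldl pvStepB idx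
  ((PySem.Str.pyGet? "LCR" idx).map (fun c => String.ofList [c])).getD ""  -- "LCR"[idx]; in range inside Pre_

-- ===== PRECONDITION & SPEC =====
-- Pre_ excludes exactly the pos values on which A raises UnboundLocalError
def Pre_check_pos (pos : String) (move : String) : Prop :=
  pos = "L" ∨ pos = "C" ∨ pos = "R"
instance (pos : String) (move : String) : Decidable (Pre_check_pos pos move) := by
  unfold Pre_check_pos; infer_instance

def pvWitness_check_pos : String × String := ("L", "ABCA")

def Spec_check_pos (pos : String) (move : String) (out : String) : Prop := out = check_pos_alt pos move
instance (pos : String) (move : String) (out : String) : Decidable (Spec_check_pos pos move out) := by unfold Spec_check_pos; infer_instance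

-- ===== CLAIM (what is proved, stated in full; the proofs are below) =====
def Claim_equal_check_pos : Prop := ∀ (pos : String) (move : String), Dom_check_pos pos move → Pre_check_pos pos move → Spec_check_pos pos move (check_pos pos move)

-- ===== LEMMAS AND PROOFS =====

-- the 3-element list A maintains, as a function of the index B maintains
def pvIns (i : Int) : List String :=
  if i = 0 then ["O", "X", "X"] else if i = 1 then ["X", "O", "X"] else ["X", "X", "O"]

lemma pvStep_rel (i : Int) (hi : i = 0 ∨ i = 1 ∨ i = 2) (c : Char) :
    pvStepA (pvIns i) c = pvIns (pvStepB i c) ∧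
      (pvStepB i c = 0 ∨ pvStepB i c = 1 ∨ pvStepB i c = 2) := by
  by_cases hA : c = 'A'
  · subst hA; rcases hi with h | h | h <;> subst h <;> exact ⟨by decide, by decide⟩
  · by_cases hB : c = 'B'
    · subst hB; rcases hi with h | h | h <;> subst h <;> exact ⟨by decide, by decide⟩
    · by_cases hC : c = 'C'
      · subst hC; rcases hi with h | h | h <;> subst h <;> exact ⟨by decide, by decide⟩
      · have hperm : pvPerm = ((PySem.Dict.empty.insert 'A' [1, 0, 2]).insert 'B' [0, 2, 1]).insert 'C' [2, 1, 0] := rfl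
        have hget : pvPerm.get? c = none := by
          rw [hperm, PySem.Dict.get?_insert, PySem.Dict.get?_insert, PySem.Dict.get?_insert]
          simp [hA, hB, hC, PySem.Dict.get?_empty]
        constructor
        · simp [pvStepA, pvStepB, hA, hB, hC, hget]
        · simp [pvStepB, hget]; exact hi

lemma pvFold_rel (cs : List Char) (i : Int) (hi : i = 0 ∨ i = 1 ∨ i = 2) :
    cs.foldl pvStepA (pvIns i) = pvIns (cs.foldl pvStepB i) ∧
      (cs.foldl pvStepB i = 0 ∨ cs.foldl pvStepB i = 1 ∨ cs.foldl pvStepB i = 2) := by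
  induction cs generalizing i with
  | nil => exact ⟨rfl, hi⟩
  | cons c cs ih =>
    obtain ⟨h1, h2⟩ := pvStep_rel i hi c
    simpa [List.foldl, h1] using ih (pvStepB i c) h2

lemma pvOut_eq (j : Int) (hj : j = 0 ∨ j = 1 ∨ j = 2) :
    (if PySem.List.index? (pvIns j) "O" = some 0 then "L"
     else if PySem.List.index? (pvIns j) "O" = some 1 then "C"
     else if PySem.List.index? (pvIns j) "O" = some 2 then "R"
     else "") = ((PySem.Str.pyGet? "LCR" j).map (fun c => String.ofList [c])).getD "" := by
  rcases hj with h | h | h <;> subst h <;> decide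

lemma check_pos_eq_of_start (pos : String) (move : String) (k : Int)
    (hk : k = 0 ∨ k = 1 ∨ k = 2)
    (hA : (if pos = "L" then ["O", "X", "X"]
           else if pos = "C" then ["X", "O", "X"]
           else if pos = "R" then ["X", "X", "O"] else []) = pvIns k)
    (hB : PySem.Str.find "LCR" pos = k) :
    check_pos pos move = check_pos_alt pos move := by
  unfold check_pos check_pos_alt
  obtain ⟨h1, h2⟩ := pvFold_rel move.toList k hk
  simp only [hA, hB, h1]
  exact pvOut_eq _ h2

-- ===== VERDICT (by name: the statement is the Claim_ definition above) =====
theorem check_pos_spec : Claim_equal_check_pos := by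
  intro pos move _ hpre
  show check_pos pos move = check_pos_alt pos move
  rcases hpre with h | h | h <;> subst h
  · exact check_pos_eq_of_start _ move 0 (by decide) (by decide) (by decide)
  · exact check_pos_eq_of_start _ move 1 (by decide) (by decide) (by decide)
  · exact check_pos_eq_of_start _ move 2 (by decide) (by decide) (by decide)
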